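-- pv_equiv track=rewrite | github.com/mrtomatwo/gal-pal | _galpal/model.py | merge_emails
-- ===== SOURCE A (Python) =====
-- def merge_emails(gal_email: str | None, display_name: str | None, existing: list | None):
--     """GAL address goes first; any extra addresses the user added are kept.
--
--     When the GAL email matches an existing address case-insensitively (the user
--     already had `John.Smith@x.com` and the GAL serves `john.smith@x.com`), the
--     existing casing is preserved — the user may have set it deliberately and
--     Graph treats addresses as case-insensitive anyway, so overwriting with the
--     GAL casing is silent data loss. The `name` field still comes from the GAL
--     `display_name` because names are GAL-authoritative.
--     """
--     out: list[dict] = []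
--     seen: set[str] = set()
--     existing = existing or []
--     if gal_email:
--         gal_lc = gal_email.lower()
--         # Preserve user-stored casing on a case-insensitive match.
--         user_match = next(
--             (e.get("address") for e in existing if (e.get("address") or "").lower() == gal_lc),
--             None,
--         )
--         address = user_match or gal_email
--         out.append({"address": address, "name": display_name or address})
--         seen.add(gal_lc)
--     for e in existing:
--         addr = (e.get("address") or "").lower()
--         if addr and addr not in seen:
--             out.append({k: e[k] for k in ("address", "name") if k in e})
--             seen.add(addr)
--     return out
-- ===== SOURCE B (Python) =====
-- def merge_emails(gal_email: str | None, display_name: str | None, existing: list | None):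
--     # Build an ordered index keyed by lowercased address (first occurrence wins,
--     # empty addresses skipped), then emit the output from the index.
--     idx: dict[str, dict] = {}
--     for e in (existing or []):
--         addr = (e.get("address") or "").lower()
--         if addr and addr not in idx:
--             idx[addr] = {k: e[k] for k in ("address", "name") if k in e}
--     out: list[dict] = []
--     if gal_email:
--         gal_lc = gal_email.lower()
--         hit = idx.pop(gal_lc, None)
--         address = (hit.get("address") if hit else None) or gal_email
--         out.append({"address": address, "name": display_name or address})
--     out.extend(idx.values())
--     return out
-- ===== Notes on version B (the rewrite author's own statement) =====
-- stated objective: alternative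
-- what changed: Replaces A's next()-scan for the GAL match plus a seen-set dedup loop by a single pass that builds an ordered index keyed by lowercased address and then emits the output from the index (pop the GAL key, append the remaining values).
import Mathlib
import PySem

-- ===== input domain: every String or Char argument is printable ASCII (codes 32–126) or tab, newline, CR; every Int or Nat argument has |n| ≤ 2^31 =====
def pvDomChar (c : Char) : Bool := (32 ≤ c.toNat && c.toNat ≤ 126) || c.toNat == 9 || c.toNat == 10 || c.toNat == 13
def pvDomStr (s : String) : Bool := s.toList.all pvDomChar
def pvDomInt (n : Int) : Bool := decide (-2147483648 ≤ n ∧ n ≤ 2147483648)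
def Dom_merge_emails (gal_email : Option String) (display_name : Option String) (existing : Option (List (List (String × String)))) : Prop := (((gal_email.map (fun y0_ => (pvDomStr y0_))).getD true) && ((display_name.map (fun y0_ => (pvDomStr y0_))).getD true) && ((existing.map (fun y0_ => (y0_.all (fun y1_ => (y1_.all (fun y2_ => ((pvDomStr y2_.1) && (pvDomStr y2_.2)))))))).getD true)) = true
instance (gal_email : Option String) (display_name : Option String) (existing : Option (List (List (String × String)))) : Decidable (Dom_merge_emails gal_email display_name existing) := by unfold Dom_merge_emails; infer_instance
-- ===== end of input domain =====

-- B replaces A's next()-rescan plus seen-set dedup loop by building an ordered index keyed by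
-- lowercased address in one pass and emitting the output from that index (alternative decomposition).



-- shared transliterations of Python subexpressions that appear verbatim in both sources
-- Python truthiness of an Optional[str]
def pvTruthy (o : Option String) : Bool :=
  match o with
  | none => false
  | some s => !(s == "")

-- Python `o or d` for o an Optional[str]
def pvOrElse (o : Option String) (d : String) : String :=
  match o with
  | none => d
  | some s => if s == "" then d else s

-- e.get(k) on a dict modelled as an association list
def pvGet (e : List (String × String)) (k : String) : Option String :=
  (PySem.Dict.mk e).get? k

-- (e.get("address") or "").lower()
def pvAddrLC (e : List (String × String)) : String :=
  PySem.Str.lower (pvOrElse (pvGet e "address") "")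

-- {k: e[k] for k in ("address", "name") if k in e}
def pvProj (e : List (String × String)) : List (String × String) :=
  (if (PySem.Dict.mk e).contains "address" then [("address", (pvGet e "address").getD "")] else []) ++
  (if (PySem.Dict.mk e).contains "name" then [("name", (pvGet e "name").getD "")] else [])

-- ===== PORT A =====
def merge_emails (gal_email : Option String) (display_name : Option String) (existing : Option (List (List (String × String)))) : List (List (String × String)) :=
  let existing := existing.getD []
  let init : List (List (String × String)) × PySem.Set String :=
    if pvTruthy gal_email then
      let g := gal_email.getD ""
      let gal_lc := PySem.Str.lower g
      let user_match := (existing.find? (fun e => pvAddrLC e == gal_lc)).bind (fun e => pvGet e "address")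
      let address := pvOrElse user_match g
      ([[("address", address), ("name", pvOrElse display_name address)]],
       PySem.Set.add PySem.Set.empty gal_lc)
    else ([], PySem.Set.empty)
  (existing.foldl
    (fun st e =>
      if !(pvAddrLC e == "") && !(PySem.Set.contains st.2 (pvAddrLC e)) then
        (st.1 ++ [pvProj e], PySem.Set.add st.2 (pvAddrLC e))
      else st)
    init).1

-- ===== PORT B =====
def merge_emails_alt (gal_email : Option String) (display_name : Option String) (existing : Option (List (List (String × String)))) : List (List (String × String)) :=
  let existing := existing.getD []
  let idx : PySem.Dict String (List (String × String)) :=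
    existing.foldl
      (fun d e =>
        if !(pvAddrLC e == "") && !(d.contains (pvAddrLC e)) then d.insert (pvAddrLC e) (pvProj e)
        else d)
      PySem.Dict.empty
  if pvTruthy gal_email then
    let g := gal_email.getD ""
    let gal_lc := PySem.Str.lower g
    let hit := idx.get? gal_lc
    let idx' := idx.erase gal_lc
    let address := pvOrElse (hit.bind (fun h => pvGet h "address")) g
    [("address", address), ("name", pvOrElse display_name address)] :: idx'.values
  else idx.values

-- ===== PRECONDITION & SPEC =====
def Spec_merge_emails (gal_email : Option String) (display_name : Option String) (existing : Option (List (List (String × String)))) (out : List (List (String × String))) : Prop := out = merge_emails_alt gal_email display_name existing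
instance (gal_email : Option String) (display_name : Option String) (existing : Option (List (List (String × String)))) (out : List (List (String × String))) : Decidable (Spec_merge_emails gal_email display_name existing out) := by unfold Spec_merge_emails; infer_instance

-- ===== CLAIM (what is proved, stated in full; the proofs are below) =====
def Claim_equal_merge_emails : Prop := ∀ (gal_email : Option String) (display_name : Option String) (existing : Option (List (List (String × String)))), Dom_merge_emails gal_email display_name existing → Spec_merge_emails gal_email display_name existing (merge_emails gal_email display_name existing)

-- ===== LEMMAS AND PROOFS =====

-- the first-occurrence stream both programs realise: key/value pairs of the entries with a
-- nonempty lowercased address not seen before, in order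
def pvFO (seen : List String) : List (List (String × String)) → List (String × List (String × String))
  | [] => []
  | e :: es =>
    if !(pvAddrLC e == "") && !(seen.contains (pvAddrLC e)) then
      (pvAddrLC e, pvProj e) :: pvFO (pvAddrLC e :: seen) es
    else pvFO seen es

theorem pvFO_congr (es : List (List (String × String))) :
    ∀ s t : List String, (∀ x, x ∈ s ↔ x ∈ t) → pvFO s es = pvFO t es := by
  induction es with
  | nil => intro s t _; rfl
  | cons e es ih =>
    intro s t h
    simp only [pvFO]
    have hc : s.contains (pvAddrLC e) = t.contains (pvAddrLC e) := by
      by_cases hm : pvAddrLC e ∈ t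
      · have hs' := (h _).mpr hm
        simp [hm, hs']
      · have hs' : pvAddrLC e ∉ s := fun hs => hm ((h _).mp hs)
        simp [hm, hs']
    rw [hc]
    split
    · rw [ih (pvAddrLC e :: s) (pvAddrLC e :: t) (by intro x; simp [h x])]
    · exact ih s t h

theorem pvFO_key_not_mem (es : List (List (String × String))) :
    ∀ (s : List String) p, p ∈ pvFO s es → p.1 ∉ s := by
  induction es with
  | nil => intro s p hp; simp [pvFO] at hp
  | cons e es ih =>
    intro s p hp
    simp only [pvFO] at hp
    split at hp
    · rename_i hcond
      simp only [Bool.and_eq_true, Bool.not_eq_true', beq_eq_false_iff_ne, ne_eq,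
        List.contains_eq_mem, decide_eq_false_iff_not] at hcond
      rcases List.mem_cons.mp hp with h1 | h2
      · subst h1
        exact hcond.2
      · intro hm
        exact ih _ _ h2 (List.mem_cons_of_mem _ hm)
    · exact ih _ _ hp

theorem pvFO_cons_filter (es : List (List (String × String))) :
    ∀ (s : List String) (k : String), pvFO (k :: s) es = (pvFO s es).filter (fun p => !(p.1 == k)) := by
  induction es with
  | nil => intro s k; rfl
  | cons e es ih =>
    intro s k
    simp only [pvFO]
    by_cases ha : pvAddrLC e = ""
    · simp only [ha, beq_self_eq_true, Bool.not_true, Bool.false_and, Bool.false_eq_true, if_false]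
      exact ih s k
    · by_cases hs : pvAddrLC e ∈ s
      · have h1 : s.contains (pvAddrLC e) = true := by simp [hs]
        have h2 : (k :: s).contains (pvAddrLC e) = true := by simp [hs]
        simp only [h1, h2, Bool.not_true, Bool.and_false, Bool.false_eq_true, if_false]
        exact ih s k
      · have h1 : s.contains (pvAddrLC e) = false := by simp [hs]
        by_cases hk : pvAddrLC e = k
        · subst hk
          have h2 : (pvAddrLC e :: s).contains (pvAddrLC e) = true := by simp
          simp only [h1, h2, Bool.not_true, Bool.and_false, Bool.false_eq_true, if_false,
            Bool.not_false, beq_eq_false_iff_ne.mpr ha, Bool.and_true,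
            if_pos, List.filter_cons, beq_self_eq_true]
          exact (List.filter_eq_self.mpr (fun p hp => by
              have hnm := pvFO_key_not_mem es _ p hp
              have hne : p.1 ≠ pvAddrLC e := fun h => hnm (h ▸ List.mem_cons_self)
              simp [hne])).symm
        · have h2 : (k :: s).contains (pvAddrLC e) = false := by simp [hs, hk]
          rw [if_pos (by simp [ha, hk, hs] : (!(pvAddrLC e == "") && !((k :: s).contains (pvAddrLC e))) = true),
            if_pos (by simp [ha, hs] : (!(pvAddrLC e == "") && !(s.contains (pvAddrLC e))) = true),
            List.filter_cons]
          have hcg := pvFO_congr es (pvAddrLC e :: k :: s) (k :: pvAddrLC e :: s)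
            (fun x => by simp [List.mem_cons, or_left_comm])
          rw [hcg, ih (pvAddrLC e :: s) k]
          simp [hk]

-- A's dedup loop, from any start state, appends the values of the first-occurrence stream
theorem pvA_loop (es : List (List (String × String))) :
    ∀ (out : List (List (String × String))) (seen : PySem.Set String),
    (es.foldl
      (fun st e =>
        if !(pvAddrLC e == "") && !(PySem.Set.contains st.2 (pvAddrLC e)) then
          (st.1 ++ [pvProj e], PySem.Set.add st.2 (pvAddrLC e))
        else st)
      (out, seen)).1 = out ++ (pvFO seen es).map (·.2) := by
  induction es with
  | nil => intro out seen; simp [pvFO]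
  | cons e es ih =>
    intro out seen
    simp only [List.foldl_cons, pvFO]
    by_cases hm : pvAddrLC e ∈ seen
    · have h1 : PySem.Set.contains seen (pvAddrLC e) = true := by
        simpa using (PySem.Set.contains_iff seen (pvAddrLC e)).mpr hm
      have h1' : List.contains seen (pvAddrLC e) = true := by simp [hm]
      simp only [h1, h1', Bool.not_true, Bool.and_false, Bool.false_eq_true, if_false]
      exact ih out seen
    · have h1 : PySem.Set.contains seen (pvAddrLC e) = false := by
        rcases h : PySem.Set.contains seen (pvAddrLC e) with _ | _
        · rfl
        · exact absurd ((PySem.Set.contains_iff seen (pvAddrLC e)).mp h) hm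
      have h1' : List.contains seen (pvAddrLC e) = false := by simp [hm]
      by_cases ha : pvAddrLC e = ""
      · simp only [ha, beq_self_eq_true, Bool.not_true, Bool.false_and, Bool.false_eq_true,
          if_false]
        exact ih out seen
      · rw [if_pos (by simp [ha, hm] : (!(pvAddrLC e == "") && !(PySem.Set.contains seen (pvAddrLC e))) = true),
          if_pos (by simp [ha, hm] : (!(pvAddrLC e == "") && !(List.contains seen (pvAddrLC e))) = true),
          ih, PySem.Set.add_of_not_mem hm,
          pvFO_congr es (seen ++ [pvAddrLC e]) (pvAddrLC e :: seen)
            (fun x => by simp [List.mem_append, List.mem_cons, or_comm])]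
        simp

-- B's index loop, from any start dict, appends the first-occurrence stream to the items
theorem pvB_loop (es : List (List (String × String))) :
    ∀ (d : PySem.Dict String (List (String × String))),
    (es.foldl
      (fun d e =>
        if !(pvAddrLC e == "") && !(d.contains (pvAddrLC e)) then d.insert (pvAddrLC e) (pvProj e)
        else d)
      d).items = d.items ++ pvFO d.keys es := by
  induction es with
  | nil => intro d; simp [pvFO]
  | cons e es ih =>
    intro d
    simp only [List.foldl_cons, pvFO]
    by_cases hm : pvAddrLC e ∈ d.keys
    · have h1 : d.contains (pvAddrLC e) = true := (PySem.Dict.contains_iff_mem_keys d _).mpr hm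
      have h1' : List.contains d.keys (pvAddrLC e) = true := by simp [hm]
      simp only [h1, h1', Bool.not_true, Bool.and_false, Bool.false_eq_true, if_false]
      exact ih d
    · have h1 : d.contains (pvAddrLC e) = false := by
        rcases h : d.contains (pvAddrLC e) with _ | _
        · rfl
        · exact absurd ((PySem.Dict.contains_iff_mem_keys d _).mp h) hm
      have h1' : List.contains d.keys (pvAddrLC e) = false := by simp [hm]
      by_cases ha : pvAddrLC e = ""
      · simp only [ha, beq_self_eq_true, Bool.not_true, Bool.false_and, Bool.false_eq_true,
          if_false]
        exact ih d
      · rw [if_pos (by simp [h1, ha] : (!(pvAddrLC e == "") && !(d.contains (pvAddrLC e))) = true),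
          if_pos (by simp [ha, hm] : (!(pvAddrLC e == "") && !(List.contains d.keys (pvAddrLC e))) = true),
          ih, PySem.Dict.items_insert_of_not_contains d (pvProj e) h1,
          PySem.Dict.keys_insert_of_not_contains d (pvProj e) h1,
          pvFO_congr es (d.keys ++ [pvAddrLC e]) (pvAddrLC e :: d.keys)
            (fun x => by simp [List.mem_append, List.mem_cons, or_comm])]
        simp

-- the GAL lookup: scanning the entries equals looking the key up in the first-occurrence stream
theorem pvFind_eq (es : List (List (String × String))) :
    ∀ (seen : List String) (k : String), k ≠ "" → k ∉ seen →
    ((((pvFO seen es).find? (fun p => p.1 == k)).map (·.2)).bind (fun h => pvGet h "address"))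
      = (es.find? (fun e => pvAddrLC e == k)).bind (fun e => pvGet e "address") := by
  induction es with
  | nil => intro seen k _ _; rfl
  | cons e es ih =>
    intro seen k hk hns
    simp only [pvFO]
    by_cases hek : pvAddrLC e = k
    · have hne : (pvAddrLC e == "") = false := by simp [hek, hk]
      have hnc : List.contains seen (pvAddrLC e) = false := by simp [hek, hns]
      rw [if_pos (by simp [hek, hns, hk])]
      rw [List.find?_cons_of_pos (by simp [hek]), List.find?_cons_of_pos (by simp [hek])]
      simp only [Option.map_some, Option.bind_some]
      have hget : ∃ v, pvGet e "address" = some v := by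
        rcases h : pvGet e "address" with _ | v
        · exfalso
          apply hk
          rw [← hek]
          simp [pvAddrLC, h, pvOrElse, PySem.Str.lower]
          decide
        · exact ⟨v, rfl⟩
      rcases hget with ⟨v, hv⟩
      have hcont : (PySem.Dict.mk e).contains "address" = true := by
        simp only [pvGet, PySem.Dict.get?] at hv
        rcases hf : List.find? (fun p => p.1 == "address") e with _ | p
        · simp [hf] at hv
        · have hp := List.find?_some hf
          exact List.any_eq_true.mpr ⟨p, List.mem_of_find?_eq_some hf, by simpa using hp⟩
      simp only [pvProj, hcont, if_pos, hv, Option.getD_some]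
      simp [pvGet, PySem.Dict.get?]
    · have hbk : (pvAddrLC e == k) = false := beq_eq_false_iff_ne.mpr hek
      rw [List.find?_cons_of_neg (by simp [hek])]
      split
      · rename_i hcond
        rw [List.find?_cons_of_neg (by simp [hek])]
        exact ih (pvAddrLC e :: seen) k hk (by simp [List.mem_cons]; exact ⟨fun h => hek h.symm, hns⟩)
      · exact ih seen k hk hns

-- ===== VERDICT (by name: the statement is the Claim_ definition above) =====
theorem merge_emails_spec : Claim_equal_merge_emails := by
  intro gal_email display_name existing _
  unfold Spec_merge_emails merge_emails merge_emails_alt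
  rcases hg : pvTruthy gal_email with _ | _
  · simp only [Bool.false_eq_true, if_false]
    rw [pvA_loop]
    simp only [PySem.Dict.values]
    rw [pvB_loop]
    simp [PySem.Dict.empty, PySem.Dict.keys, PySem.Set.empty]
  · simp only [if_pos]
    rw [pvA_loop]
    have hadd : PySem.Set.add PySem.Set.empty (PySem.Str.lower (gal_email.getD ""))
        = [PySem.Str.lower (gal_email.getD "")] := by
      rw [PySem.Set.add_of_not_mem (by simp [PySem.Set.empty])]
      rfl
    rw [hadd]
    have hk : PySem.Str.lower (gal_email.getD "") ≠ "" := by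
      rcases gal_email with _ | g
      · simp [pvTruthy] at hg
      · have hg' : g ≠ "" := by simpa [pvTruthy] using hg
        simp only [Option.getD_some]
        intro h
        apply hg'
        have h2 : (PySem.Str.lower g).toList = [] := by rw [h]; rfl
        simp only [PySem.Str.toList_lower] at h2
        have h3 : g.toList = [] := by
          cases hgl : g.toList with
          | nil => rfl
          | cons c cs => rw [hgl] at h2; simp [PySem.Chars.lower] at h2
        exact String.toList_eq_nil_iff.mp h3
    set es := existing.getD [] with hes
    set k := PySem.Str.lower (gal_email.getD "") with hkdef
    have hidx_items :
        (es.foldl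
          (fun d e =>
            if !(pvAddrLC e == "") && !(d.contains (pvAddrLC e)) then d.insert (pvAddrLC e) (pvProj e)
            else d)
          PySem.Dict.empty).items = pvFO [] es := by
      rw [pvB_loop]; rfl
    have hvals :
        ((es.foldl
          (fun d e =>
            if !(pvAddrLC e == "") && !(d.contains (pvAddrLC e)) then d.insert (pvAddrLC e) (pvProj e)
            else d)
          PySem.Dict.empty).erase k).values
          = (pvFO [k] es).map (·.2) := by
      simp only [PySem.Dict.erase, PySem.Dict.values, hidx_items, pvFO_cons_filter es [] k]
    have hget :
        ((es.foldl
          (fun d e =>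
            if !(pvAddrLC e == "") && !(d.contains (pvAddrLC e)) then d.insert (pvAddrLC e) (pvProj e)
            else d)
          PySem.Dict.empty).get? k).bind (fun h => pvGet h "address")
          = (es.find? (fun e => pvAddrLC e == k)).bind (fun e => pvGet e "address") := by
      simp only [PySem.Dict.get?, hidx_items]
      rw [← pvFind_eq es [] k hk (by simp)]
    rw [hvals, hget]
    rfl
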